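-- pv_equiv track=rewrite | github.com/mingjunp/info30005-2019-lf- | CSCI/EXAM 2/othello.py | findTokenBottomLeft
-- ===== SOURCE A (Python) =====
-- def inGrid(row,col):
--     if row >=0 and row<=7 and col>=0 and col<=7:
--         return True
--     else:
--         return False
--
-- def findTokenBottomLeft(board,row,col,color):
--     if inGrid(row + 1, col - 1):
--         if board[row + 1][col - 1] != color and board[row + 1][col - 1] !=0:
--             return 1 + findTokenBottomLeft(board, row + 1, col - 1, color)
--         elif board[row + 1][col-1] == color:
--             return 0
--         elif board[row + 1][col-1] == 0:
--             return -8
--     else: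
--         return -8
-- ===== SOURCE B (Python) =====
-- def inGrid(row, col):
--     if row >= 0 and row <= 7 and col >= 0 and col <= 7:
--         return True
--     else:
--         return False
--
-- def findTokenBottomLeft(board, row, col, color):
--     count = 0
--     r, c = row + 1, col - 1
--     while inGrid(r, c):
--         v = board[r][c]
--         if v == color:
--             return count
--         if v == 0:
--             return count - 8
--         count += 1
--         r, c = r + 1, c - 1
--     return count - 8
-- ===== Notes on version B (the rewrite author's own statement) =====
-- stated objective: simpler
-- what changed: Replaced A's recursion that sums 1 + f(next) with a sentinel -8 base case by a single iterative while-loop carrying a count accumulator and returning count, count-8 directly.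
-- outside the precondition, e.g. on findTokenBottomLeft([[0, 5]], -1, 2, 5): A returns 0, B returns 0
import Mathlib
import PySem

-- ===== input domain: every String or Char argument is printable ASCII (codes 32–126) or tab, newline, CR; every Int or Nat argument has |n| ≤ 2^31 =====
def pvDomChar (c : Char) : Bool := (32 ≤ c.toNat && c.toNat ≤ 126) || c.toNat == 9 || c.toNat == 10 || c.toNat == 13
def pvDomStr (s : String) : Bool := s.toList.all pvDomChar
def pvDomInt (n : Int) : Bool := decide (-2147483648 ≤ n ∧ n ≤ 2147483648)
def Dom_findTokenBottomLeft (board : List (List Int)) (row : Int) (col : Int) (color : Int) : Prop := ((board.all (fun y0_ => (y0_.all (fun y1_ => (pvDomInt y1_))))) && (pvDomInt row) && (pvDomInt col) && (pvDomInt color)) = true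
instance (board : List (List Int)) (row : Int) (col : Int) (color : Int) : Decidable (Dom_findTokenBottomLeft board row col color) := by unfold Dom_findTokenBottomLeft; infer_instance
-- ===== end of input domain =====

-- B replaces A's recursion-with-sentinel by an iterative scan with a count accumulator (objective: simpler; same cost).

-- ===== PORT A =====
-- helper inGrid of A, literally (if-then-True-else-False)
def inGridA (row : Int) (col : Int) : Bool :=
  if 0 ≤ row ∧ row ≤ 7 ∧ 0 ≤ col ∧ col ≤ 7 then true else false

-- board[r][c]; Python raises IndexError where pyGet? is none — those inputs are outside Pre_,
-- the `.getD` defaults are never reached inside Pre_.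
def cellA (board : List (List Int)) (r : Int) (c : Int) : Int :=
  ((PySem.List.pyGet? ((PySem.List.pyGet? board r).getD []) c)).getD 0

def findTokenBottomLeft (board : List (List Int)) (row : Int) (col : Int) (color : Int) : Int :=
  if inGridA (row + 1) (col - 1) then
    if cellA board (row + 1) (col - 1) ≠ color ∧ cellA board (row + 1) (col - 1) ≠ 0 then
      1 + findTokenBottomLeft board (row + 1) (col - 1) color
    else if cellA board (row + 1) (col - 1) = color then 0
    else -8
  else -8
termination_by (7 - row).toNat
decreasing_by
  simp [inGridA] at *
  omega

-- ===== PORT B =====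
def inGridB (row : Int) (col : Int) : Bool :=
  decide (0 ≤ row ∧ row ≤ 7 ∧ 0 ≤ col ∧ col ≤ 7)

-- the while loop of B, with its accumulator `count`
def fTBLoop (board : List (List Int)) (color : Int) (r : Int) (c : Int) (count : Int) : Int :=
  if inGridB r c then
    let v := ((PySem.List.pyGet? ((PySem.List.pyGet? board r).getD []) c)).getD 0
    if v = color then count
    else if v = 0 then count - 8
    else fTBLoop board color (r + 1) (c - 1) (count + 1)
  else count - 8
termination_by (8 - r).toNat
decreasing_by
  simp only [inGridB, decide_eq_true_eq] at *
  omega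

def findTokenBottomLeft_alt (board : List (List Int)) (row : Int) (col : Int) (color : Int) : Int :=
  fTBLoop board color (row + 1) (col - 1) 0

-- ===== PRECONDITION & SPEC =====
-- Pre_ excludes inputs on which the diagonal scan meets a cell (row+m, col-m) that is inside the
-- 8x8 grid (with all earlier steps inside too) but missing from the ragged `board`: there Python's
-- chained indexing would raise IndexError (or, when the scan stops early at a token, A returns a
-- value Pre_ conservatively still excludes — see cites).
def Pre_findTokenBottomLeft (board : List (List Int)) (row : Int) (col : Int) (color : Int) : Prop :=
  ∀ k ∈ List.range 8,
    (∀ j ∈ List.range (k + 1),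
      0 ≤ row + (j + 1) ∧ row + (j + 1) ≤ 7 ∧ 0 ≤ col - (j + 1) ∧ col - (j + 1) ≤ 7) →
    (row + (k + 1) < (board.length : Int) ∧
     col - (k + 1) < ((board.getD (row + (k + 1)).toNat []).length : Int))
instance (board : List (List Int)) (row : Int) (col : Int) (color : Int) : Decidable (Pre_findTokenBottomLeft board row col color) := by unfold Pre_findTokenBottomLeft; infer_instance

def pvWitness_findTokenBottomLeft : List (List Int) × Int × Int × Int :=
  ([[0,1,2],[1,2,0],[2,0,1]], 0, 2, 2)

def Spec_findTokenBottomLeft (board : List (List Int)) (row : Int) (col : Int) (color : Int) (out : Int) : Prop := out = findTokenBottomLeft_alt board row col color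
instance (board : List (List Int)) (row : Int) (col : Int) (color : Int) (out : Int) : Decidable (Spec_findTokenBottomLeft board row col color out) := by unfold Spec_findTokenBottomLeft; infer_instance

-- ===== CLAIM (what is proved, stated in full; the proofs are below) =====
def Claim_equal_findTokenBottomLeft : Prop := ∀ (board : List (List Int)) (row : Int) (col : Int) (color : Int), Dom_findTokenBottomLeft board row col color → Pre_findTokenBottomLeft board row col color → Spec_findTokenBottomLeft board row col color (findTokenBottomLeft board row col color)

-- ===== LEMMAS AND PROOFS =====

lemma inGrid_eq (r c : Int) : inGridB r c = inGridA r c := by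
  simp [inGridA, inGridB]

-- The Lean ports read cells through the same total getD-lookup, so the loop/recursion
-- correspondence holds without Pre_: the loop returns its accumulator plus A's value.
lemma loop_eq_rec (board : List (List Int)) (color : Int) :
    ∀ (n : ℕ) (row col count : Int), n = (7 - row).toNat →
      fTBLoop board color (row + 1) (col - 1) count
        = count + findTokenBottomLeft board row col color := by
  intro n
  induction n using Nat.strong_induction_on with
  | _ n ih =>
    intro row col count hn
    rw [fTBLoop, findTokenBottomLeft, inGrid_eq]
    by_cases hg : inGridA (row + 1) (col - 1) = true
    · simp only [hg, if_true]
      have hv : ((PySem.List.pyGet? ((PySem.List.pyGet? board (row + 1)).getD []) (col - 1))).getD 0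
          = cellA board (row + 1) (col - 1) := rfl
      rw [hv]
      rcases eq_or_ne (cellA board (row + 1) (col - 1)) color with h1 | h1
      · simp [h1]
      · rcases eq_or_ne (cellA board (row + 1) (col - 1)) 0 with h2 | h2
        · rw [h2] at h1
          simp [h2, h1]
          omega
        · simp only [h1, h2, if_neg, ne_eq, not_false_iff, and_self, if_true]
          have hrow : row + 1 ≤ 7 := by
            simp [inGridA] at hg; omega
          rw [ih (7 - (row + 1)).toNat (by omega) (row + 1) (col - 1) (count + 1) rfl]
          ring
    · simp only [Bool.not_eq_true] at hg
      simp [hg]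
      omega

-- ===== VERDICT (by name: the statement is the Claim_ definition above) =====
theorem findTokenBottomLeft_spec : Claim_equal_findTokenBottomLeft := by
  intro board row col color _ _
  unfold Spec_findTokenBottomLeft findTokenBottomLeft_alt
  have := loop_eq_rec board color (7 - row).toNat row col 0 rfl
  omega
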